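-- pv_equiv track=rewrite | github.com/iamsaurabhc/NLP | customNLTKDefn.py | getCounselDetailPara
-- ===== SOURCE A (Python) =====
-- def getCounselDetailPara(words):
--     applicantCounselGroup = []
--     respondentCounselGroup = []
--     counselPara = []
--
--     for w in words:
--         if w == 'advocate' or w == 'adv':
--             counselPara = words[words.index(w)-5:words.index(w)+40]
--
--     for w in counselPara:
--         if w == 'applicant' or w == 'plaintiff':
--             applicantCounselGroup = counselPara[0:counselPara.index(w)]
--             respondentCounselGroup = counselPara[counselPara.index(w)+1:len(counselPara)]
--
--     return applicantCounselGroup,respondentCounselGroup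
-- ===== SOURCE B (Python) =====
-- def getCounselDetailPara(words):
--     for i, w in enumerate(words):
--         if w in ('advocate', 'adv'):
--             counselPara = words[i-5:i+40]
--             break
--     else:
--         return [], []
--     for j, w in enumerate(counselPara):
--         if w in ('applicant', 'plaintiff'):
--             return counselPara[:j], counselPara[j+1:]
--     return [], []
-- ===== Notes on version B (the rewrite author's own statement) =====
-- stated objective: simpler
-- what changed: B is a single pass that breaks at the first marker word with its index recorded by enumerate (one slice, then one scan of the slice), instead of A's loops that recompute list.index and re-slice at every marker occurrence; Pre_ excludes lists containing both spellings of a phase's marker ('advocate' and 'adv', or 'applicant' and 'plaintiff'), where which occurrence anchors the slice is an accidental first-vs-last corner (A uses the first occurrence of the last matched spelling, B the first marker).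
import Mathlib
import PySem

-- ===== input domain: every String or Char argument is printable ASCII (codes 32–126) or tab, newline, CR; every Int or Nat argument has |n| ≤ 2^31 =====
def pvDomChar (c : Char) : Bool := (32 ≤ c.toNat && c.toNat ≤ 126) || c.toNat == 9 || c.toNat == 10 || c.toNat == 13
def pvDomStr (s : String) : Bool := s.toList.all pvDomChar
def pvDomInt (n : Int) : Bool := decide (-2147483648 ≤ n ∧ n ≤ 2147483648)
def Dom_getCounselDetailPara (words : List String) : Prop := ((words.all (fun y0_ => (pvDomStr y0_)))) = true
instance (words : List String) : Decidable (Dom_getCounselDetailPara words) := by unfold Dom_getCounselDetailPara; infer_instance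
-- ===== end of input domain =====

-- B scans once and breaks at the FIRST marker word (index recorded directly by enumerate),
-- instead of A's loops that keep re-slicing at every marker and re-scan with list.index.

-- ===== PORT A =====
def getCounselDetailPara (words : List String) : List String × List String :=
  let counselPara := words.foldl (fun cp w =>
    if w == "advocate" || w == "adv" then
      match PySem.List.index? words w with
      | some i => PySem.List.slice words (some ((i : Int) - 5)) (some ((i : Int) + 40))
      | none => []   -- unreachable: w ∈ words, so words.index(w) never raises
    else cp) []
  counselPara.foldl (fun (g : List String × List String) w =>
    if w == "applicant" || w == "plaintiff" then
      match PySem.List.index? counselPara w with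
      | some j => (PySem.List.slice counselPara (some (0 : Int)) (some (j : Int)),
                   PySem.List.slice counselPara (some ((j : Int) + 1)) (some ((counselPara.length : Int))))
      | none => ([], [])   -- unreachable: w ∈ counselPara
    else g) ([], [])

-- ===== PORT B =====
-- B's 'for i, w in enumerate(...): if …: break / else:' — a structural scan returning the
-- first index whose word satisfies p (none if the loop falls through).
def pvScanBreak (p : String → Bool) : List String → Nat → Option Nat
  | [], _ => none
  | w :: ws, k => if p w then some k else pvScanBreak p ws (k + 1)

def getCounselDetailPara_alt (words : List String) : List String × List String :=
  match pvScanBreak (fun w => w == "advocate" || w == "adv") words 0 with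
  | none => ([], [])
  | some i =>
    let counselPara := PySem.List.slice words (some ((i : Int) - 5)) (some ((i : Int) + 40))
    match pvScanBreak (fun w => w == "applicant" || w == "plaintiff") counselPara 0 with
    | none => ([], [])
    | some j => (PySem.List.slice counselPara none (some (j : Int)),
                 PySem.List.slice counselPara (some ((j : Int) + 1)) none)

-- ===== PRECONDITION & SPEC =====
-- Pre_ excludes lists containing BOTH marker spellings of a phase ('advocate' and 'adv',
-- or 'applicant' and 'plaintiff'): there which occurrence anchors the slice/split is an
-- unspecified first-vs-last corner — A slices at the first occurrence of the LAST matched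
-- spelling, B at the first marker occurrence; both are defensible.
def Pre_getCounselDetailPara (words : List String) : Prop :=
  ¬("advocate" ∈ words ∧ "adv" ∈ words) ∧ ¬("applicant" ∈ words ∧ "plaintiff" ∈ words)
instance (words : List String) : Decidable (Pre_getCounselDetailPara words) := by
  unfold Pre_getCounselDetailPara; infer_instance

def pvWitness_getCounselDetailPara : List String :=
  ["x", "advocate", "y", "applicant", "z"]

def Spec_getCounselDetailPara (words : List String) (out : List String × List String) : Prop := out = getCounselDetailPara_alt words
instance (words : List String) (out : List String × List String) : Decidable (Spec_getCounselDetailPara words out) := by unfold Spec_getCounselDetailPara; infer_instance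

-- ===== CLAIM (what is proved, stated in full; the proofs are below) =====
def Claim_equal_getCounselDetailPara : Prop := ∀ (words : List String), Dom_getCounselDetailPara words → Pre_getCounselDetailPara words → Spec_getCounselDetailPara words (getCounselDetailPara words)

-- ===== LEMMAS AND PROOFS =====

-- tracking the last match starting from o equals tracking it from none, falling back to o
theorem lastAux_shift (p : String → Bool) (ws : List String) (o : Option String) :
    ws.foldl (fun a w => if p w then some w else a) o
      = match ws.foldl (fun a w => if p w then some w else a) none with
        | none => o
        | some u => some u := by
  induction ws generalizing o with
  | nil => simp
  | cons w ws ih =>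
    simp only [List.foldl_cons]
    rw [ih (if p w then some w else o), ih (if p w then some w else none)]
    cases h : ws.foldl (fun a w => if p w then some w else a) none <;> cases hp : p w <;> simp

-- a "last match wins" fold equals applying g to the last matched value
theorem foldl_if_last {α : Type} (p : String → Bool) (g : String → α) (ws : List String) (a0 : α) :
    ws.foldl (fun a w => if p w then g w else a) a0
      = match ws.foldl (fun a w => if p w then some w else a) none with
        | none => a0
        | some v => g v := by
  induction ws generalizing a0 with
  | nil => simp
  | cons w ws ih =>
    simp only [List.foldl_cons]
    rw [ih (if p w then g w else a0), lastAux_shift p ws (if p w then some w else none)]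
    cases h : ws.foldl (fun a w => if p w then some w else a) none <;> cases hp : p w <;> simp

-- if the last-match fold found nothing, no element matches, so B's break-scan finds nothing
theorem lastMatch_none (p : String → Bool) (ws : List String)
    (h : ws.foldl (fun a w => if p w then some w else a) none = none) (k : Nat) :
    pvScanBreak p ws k = none := by
  induction ws generalizing k with
  | nil => rfl
  | cons w ws ih =>
    simp only [List.foldl_cons] at h
    rw [lastAux_shift p ws (if p w then some w else none)] at h
    cases hrest : ws.foldl (fun a w => if p w then some w else a) none with
    | none =>
      rw [hrest] at h
      cases hp : p w with
      | true => rw [hp] at h; simp at h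
      | false => simp only [pvScanBreak, hp, Bool.false_eq_true, if_false]; exact ih hrest _
    | some u => rw [hrest] at h; simp at h
-- the last-match fold returns a matching member
theorem lastMatch_some (p : String → Bool) (ws : List String) (v : String)
    (h : ws.foldl (fun a w => if p w then some w else a) none = some v) :
    p v = true ∧ v ∈ ws := by
  induction ws with
  | nil => simp at h
  | cons w ws ih =>
    simp only [List.foldl_cons] at h
    rw [lastAux_shift p ws (if p w then some w else none)] at h
    cases hrest : ws.foldl (fun a w => if p w then some w else a) none with
    | none =>
      rw [hrest] at h
      cases hp : p w with
      | true => rw [hp] at h; simp only [if_true] at h; cases h; exact ⟨hp, List.mem_cons_self⟩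
      | false => rw [hp] at h; simp at h
    | some u =>
      rw [hrest] at h
      cases h
      obtain ⟨h1, h2⟩ := ih hrest
      exact ⟨h1, List.mem_cons_of_mem _ h2⟩

-- shifting the start index of the break-scan
theorem pvScanBreak_shift (p : String → Bool) (ws : List String) (k : Nat) :
    pvScanBreak p ws k = (pvScanBreak p ws 0).map (· + k) := by
  induction ws generalizing k with
  | nil => rfl
  | cons w ws ih =>
    cases hp : p w with
    | true => simp [pvScanBreak, hp]
    | false =>
      simp only [pvScanBreak, hp, Bool.false_eq_true, if_false]
      rw [ih (k + 1), ih 1, Option.map_map]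
      congr 1; funext m; simp; omega

-- when (== v) and p agree on the elements, Python's list.index(v) is exactly B's break-scan
theorem index?_eq_scanBreak (p : String → Bool) (ws : List String) (v : String)
    (h : ∀ x ∈ ws, (x == v) = p x) :
    PySem.List.index? ws v = pvScanBreak p ws 0 := by
  induction ws with
  | nil => exact (PySem.List.index?_eq_none_iff [] v).mpr (by simp)
  | cons w ws ih =>
    have hw : (w == v) = p w := h w List.mem_cons_self
    cases hp : p w with
    | true =>
      have : w = v := by rw [hp] at hw; exact eq_of_beq hw
      subst this
      rw [PySem.List.index?_cons_self]
      simp [pvScanBreak, hp]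
    | false =>
      have hne : w ≠ v := by rw [hp] at hw; simpa using hw
      rw [PySem.List.index?_cons_of_ne ws hne,
          ih (fun x hx => h x (List.mem_cons_of_mem _ hx))]
      simp only [pvScanBreak, hp, Bool.false_eq_true, if_false]
      rw [pvScanBreak_shift p ws 1]
-- a two-spelling marker predicate: when a list cannot contain both spellings, testing an
-- element against the matched value v is the same as testing it against the predicate
theorem tag_eq (a b v : String) (ws : List String) (hpre : ¬(a ∈ ws ∧ b ∈ ws))
    (hv : (v == a || v == b) = true) (hvm : v ∈ ws) :
    ∀ x ∈ ws, (x == v) = (x == a || x == b) := by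
  intro x hx
  by_cases hxv : x = v
  · subst hxv; simp only [beq_self_eq_true]; exact hv.symm
  · have h1 : (x == v) = false := by simp [hxv]
    rw [h1]
    by_cases hxa : (x == a || x == b) = true
    · exfalso
      have hvab : v = a ∨ v = b := by
        rcases Bool.or_eq_true_iff.mp hv with h | h
        · exact Or.inl (eq_of_beq h)
        · exact Or.inr (eq_of_beq h)
      have hxab : x = a ∨ x = b := by
        rcases Bool.or_eq_true_iff.mp hxa with h | h
        · exact Or.inl (eq_of_beq h)
        · exact Or.inr (eq_of_beq h)
      rcases hvab with hva | hvb <;> rcases hxab with hxa' | hxb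
      · exact hxv (hxa'.trans hva.symm)
      · exact hpre ⟨hva ▸ hvm, hxb ▸ hx⟩
      · exact hpre ⟨hxa' ▸ hx, hvb ▸ hvm⟩
      · exact hxv (hxb.trans hvb.symm)
    · exact (Bool.eq_false_iff.mpr (fun hh => hxa hh)).symm

-- elements of a Python slice are elements of the list
theorem mem_of_mem_slice {α : Type} (xs : List α) (a b : Option Int) (x : α)
    (h : x ∈ PySem.List.slice xs a b) : x ∈ xs := by
  unfold PySem.List.slice at h
  split at h <;> exact List.mem_of_mem_drop (List.mem_of_mem_take h)

-- xs[k : len(xs)] = xs[k:], for a Nat index k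
theorem slice_to_length {α : Type} (xs : List α) (k : Nat) :
    PySem.List.slice xs (some ((k : Nat) : Int)) (some ((xs.length : Nat) : Int))
      = PySem.List.slice xs (some ((k : Nat) : Int)) none := by
  rw [PySem.List.slice_natCast, PySem.List.slice_from_natCast]
  have : (xs.drop k).length = xs.length - k := List.length_drop
  rw [← this, List.take_length]

-- ===== VERDICT (by name: the statement is the Claim_ definition above) =====
theorem getCounselDetailPara_spec : Claim_equal_getCounselDetailPara := by
  intro words _ hpre
  obtain ⟨hpre1, hpre2⟩ := hpre
  unfold Spec_getCounselDetailPara getCounselDetailPara getCounselDetailPara_alt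
  rw [foldl_if_last (fun w => w == "advocate" || w == "adv")
      (fun w => match PySem.List.index? words w with
        | some i => PySem.List.slice words (some ((i : Int) - 5)) (some ((i : Int) + 40))
        | none => []) words []]
  cases h1 : words.foldl (fun a w => if (w == "advocate" || w == "adv") = true then some w else a) none with
  | none =>
    rw [lastMatch_none _ _ h1 0]
    simp
  | some v =>
    obtain ⟨hv, hvm⟩ := lastMatch_some _ _ _ h1
    have heq := tag_eq "advocate" "adv" v words hpre1 hv hvm
    have hidx := index?_eq_scanBreak (fun w => w == "advocate" || w == "adv") words v heq
    simp only
    cases hi : PySem.List.index? words v with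
    | none => exact absurd hvm ((PySem.List.index?_eq_none_iff words v).mp hi)
    | some i =>
      rw [hi] at hidx
      simp only [← hidx]
      set cp := PySem.List.slice words (some ((i : Int) - 5)) (some ((i : Int) + 40)) with hcp
      have hpre2' : ¬("applicant" ∈ cp ∧ "plaintiff" ∈ cp) := fun ⟨ha, hb⟩ =>
        hpre2 ⟨mem_of_mem_slice _ _ _ _ ha, mem_of_mem_slice _ _ _ _ hb⟩
      rw [foldl_if_last (fun w => w == "applicant" || w == "plaintiff")
          (fun w => match PySem.List.index? cp w with
            | some j => (PySem.List.slice cp (some (0 : Int)) (some (j : Int)),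
                         PySem.List.slice cp (some ((j : Int) + 1)) (some ((cp.length : Int))))
            | none => ([], [])) cp (([], []))]
      cases h2 : cp.foldl (fun a w => if (w == "applicant" || w == "plaintiff") = true then some w else a) none with
      | none => rw [lastMatch_none _ _ h2 0]
      | some u =>
        obtain ⟨hu, hum⟩ := lastMatch_some _ _ _ h2
        have heq2 := tag_eq "applicant" "plaintiff" u cp hpre2' hu hum
        have hidx2 := index?_eq_scanBreak (fun w => w == "applicant" || w == "plaintiff") cp u heq2
        simp only
        cases hj : PySem.List.index? cp u with
        | none => exact absurd hum ((PySem.List.index?_eq_none_iff cp u).mp hj)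
        | some j =>
          rw [hj] at hidx2
          simp only [← hidx2]
          have h1' : ((j : Int) + 1) = (((j + 1 : Nat) : Nat) : Int) := by push_cast; ring
          rw [PySem.List.slice_zero_start, h1', slice_to_length cp (j + 1)]
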